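-- pv_equiv track=rewrite | github.com/DhruvSrivastava-16/LEETCODE-PRACTISE- | distinct-numbers-in-each-subarray/distinct-numbers-in-each-subarray.py | distinctNumbers
-- ===== SOURCE A (Python) =====
-- from typing import List
--
-- from collections import deque
-- from collections import defaultdict
--
-- def distinctNumbers(nums: List[int], k: int) -> List[int]:
--     dq = deque()
--     sz = len(nums)
--     ans =[]
--     dic = defaultdict(lambda: 0)
--
--     sz_ans = len(ans)
--
--     for i in range(0,k):
--         dic[nums[i]]+=1
--         dq.append(nums[i])
--
--     ans.append(len(set(dq)))
--
--
--     for i in range(k,len(nums)):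
--
--
--         t=dq.popleft()
--         dic[t]-=1
--
--         dq.append(nums[i])
--
--
--         if dic[nums[i]]==0 and dic[t]==0:
--
--             dic[nums[i]]+=1
--             ans.append(ans[-1])
--
--         elif dic[nums[i]]==0 and dic[t]!=0:
--             dic[nums[i]]+=1
--             ans.append(ans[-1]+1)
--
--         elif dic[nums[i]]!=0 and dic[t]==0:
--             dic[nums[i]]+=1
--             ans.append(ans[-1]-1)
--
--         else:
--             dic[nums[i]]+=1
--             ans.append(ans[-1])
--
--
--
--     return(ans)
-- ===== SOURCE B (Python) =====
-- from typing import List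
--
--
-- def distinctNumbers(nums: List[int], k: int) -> List[int]:
--     # No frequency dict, no delta bookkeeping: keep the window as a plain list
--     # and recompute its distinct count directly for every position.
--     window = [nums[i] for i in range(k)]
--     ans = [len(set(window))]
--     for i in range(k, len(nums)):
--         window.pop(0)
--         window.append(nums[i])
--         ans.append(len(set(window)))
--     return ans
-- ===== Notes on version B (the rewrite author's own statement) =====
-- stated objective: simpler
-- what changed: Drops A's frequency dict and its 4-way signed-delta update of ans[-1] entirely: B keeps the window as a plain list and recomputes len(set(window)) directly for every position.
import Mathlib
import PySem

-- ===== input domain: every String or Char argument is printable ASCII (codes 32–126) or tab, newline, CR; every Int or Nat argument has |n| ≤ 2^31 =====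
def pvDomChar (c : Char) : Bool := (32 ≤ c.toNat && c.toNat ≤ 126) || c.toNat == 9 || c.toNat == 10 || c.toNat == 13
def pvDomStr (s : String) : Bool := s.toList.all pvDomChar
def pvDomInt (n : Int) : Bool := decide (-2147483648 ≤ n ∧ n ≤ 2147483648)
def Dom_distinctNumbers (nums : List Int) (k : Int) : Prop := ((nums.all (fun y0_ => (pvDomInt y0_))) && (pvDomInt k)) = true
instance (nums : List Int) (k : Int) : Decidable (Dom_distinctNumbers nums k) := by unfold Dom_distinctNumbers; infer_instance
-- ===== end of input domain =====

-- B replaces A's incremental sliding window (deque + frequency dict + 4-way signed-delta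
-- update of ans[-1]) by the direct definition: one len(set(window)) per window (simpler).

-- ===== PORT A =====
-- first loop body: dic[nums[i]] += 1; dq.append(nums[i])
def distinctAFill (nums : List Int) (st : List Int × PySem.Dict Int Int) (i : Int) :
    List Int × PySem.Dict Int Int :=
  let v := PySem.List.pyGetD nums i 0
  (st.1 ++ [v], st.2.insert v (st.2.getD v 0 + 1))

-- second loop body: t = dq.popleft(); dic[t] -= 1; dq.append(nums[i]); 4-way branch
def distinctAStep (nums : List Int) (st : List Int × PySem.Dict Int Int × List Int) (i : Int) :
    List Int × PySem.Dict Int Int × List Int :=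
  let t := st.1.headD 0                 -- dq.popleft(); empty dq excluded by Pre_
  let dic1 := st.2.1.insert t (st.2.1.getD t 0 - 1)
  let v := PySem.List.pyGetD nums i 0
  let dq2 := st.1.tail ++ [v]
  let prev := st.2.2.getLastD 0         -- ans[-1]; ans is never empty here
  if dic1.getD v 0 = 0 ∧ dic1.getD t 0 = 0 then
    (dq2, dic1.insert v (dic1.getD v 0 + 1), st.2.2 ++ [prev])
  else if dic1.getD v 0 = 0 ∧ dic1.getD t 0 ≠ 0 then
    (dq2, dic1.insert v (dic1.getD v 0 + 1), st.2.2 ++ [prev + 1])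
  else if dic1.getD v 0 ≠ 0 ∧ dic1.getD t 0 = 0 then
    (dq2, dic1.insert v (dic1.getD v 0 + 1), st.2.2 ++ [prev - 1])
  else
    (dq2, dic1.insert v (dic1.getD v 0 + 1), st.2.2 ++ [prev])

def distinctNumbers (nums : List Int) (k : Int) : List Int :=
  let _sz := PySem.List.len nums        -- sz = len(nums)  (unused, as in A)
  let _szAns : Int := 0                 -- sz_ans = len(ans)  (unused, as in A)
  let fill := (PySem.List.pyRange 0 k).foldl (distinctAFill nums) ([], PySem.Dict.empty)
  let ans : List Int := [PySem.Set.len (PySem.Set.ofList fill.1)]   -- ans.append(len(set(dq)))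
  let res := (PySem.List.pyRange k (PySem.List.len nums)).foldl (distinctAStep nums)
    (fill.1, fill.2, ans)
  res.2.2

-- ===== PORT B =====
-- loop body: window.pop(0); window.append(nums[i]); ans.append(len(set(window)))
def distinctBStep (nums : List Int) (st : List Int × List Int) (i : Int) :
    List Int × List Int :=
  let w2 := st.1.tail ++ [PySem.List.pyGetD nums i 0]   -- pop(0) on an empty window is excluded by Pre_
  (w2, st.2 ++ [PySem.Set.len (PySem.Set.ofList w2)])

def distinctNumbers_alt (nums : List Int) (k : Int) : List Int :=
  let window := (PySem.List.pyRange 0 k).map (fun i => PySem.List.pyGetD nums i 0)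
  let ans : List Int := [PySem.Set.len (PySem.Set.ofList window)]
  ((PySem.List.pyRange k (PySem.List.len nums)).foldl (distinctBStep nums) (window, ans)).2

-- ===== PRECONDITION & SPEC =====
-- Pre_ is exactly where the Python A returns: it raises IndexError whenever k > len(nums)
-- (first fill loop) and for every k ≤ 0 except the single input (nums = [], k = 0).
def Pre_distinctNumbers (nums : List Int) (k : Int) : Prop :=
  (1 ≤ k ∧ k ≤ (nums.length : Int)) ∨ (k = 0 ∧ nums = [])
instance (nums : List Int) (k : Int) : Decidable (Pre_distinctNumbers nums k) := by
  unfold Pre_distinctNumbers; infer_instance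

def pvWitness_distinctNumbers : List Int × Int := ([1, 2, 1], 2)

def Spec_distinctNumbers (nums : List Int) (k : Int) (out : List Int) : Prop :=
  out = distinctNumbers_alt nums k
instance (nums : List Int) (k : Int) (out : List Int) : Decidable (Spec_distinctNumbers nums k out) := by
  unfold Spec_distinctNumbers; infer_instance

-- ===== CLAIM (what is proved, stated in full; the proofs are below) =====
def Claim_equal_distinctNumbers : Prop := ∀ (nums : List Int) (k : Int),
  Dom_distinctNumbers nums k → Pre_distinctNumbers nums k →
  Spec_distinctNumbers nums k (distinctNumbers nums k)

-- ===== LEMMAS AND PROOFS =====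

def dcInt (l : List Int) : Int := (l.toFinset.card : Int)
theorem dcInt_cons (t : Int) (tl : List Int) :
    dcInt (t :: tl) = dcInt tl + (if t ∈ tl then 0 else 1) := by
  simp only [dcInt, List.toFinset_cons]
  by_cases h : t ∈ tl
  · simp [Finset.insert_eq_self.2 (List.mem_toFinset.2 h), h]
  · rw [Finset.card_insert_of_notMem (by simp [h])]; simp [h]
theorem dcInt_append_singleton (tl : List Int) (v : Int) :
    dcInt (tl ++ [v]) = dcInt tl + (if v ∈ tl then 0 else 1) := by
  simp only [dcInt, List.toFinset_append, List.toFinset_cons, List.toFinset_nil]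
  rw [show tl.toFinset ∪ insert v (∅:Finset Int) = insert v tl.toFinset from by ext x; simp]
  by_cases h : v ∈ tl
  · simp [Finset.insert_eq_self.2 (List.mem_toFinset.2 h), h]
  · rw [Finset.card_insert_of_notMem (by simp [h])]; simp [h]
theorem stepA_eq (nums : List Int) (t : Int) (tl : List Int) (d : PySem.Dict Int Int)
    (acc : List Int) (i : Int)
    (hd : ∀ y, d.getD y 0 = ((t :: tl).count y : Int)) :
    ∃ d', distinctAStep nums (t :: tl, d, acc ++ [dcInt (t :: tl)]) i
        = (tl ++ [PySem.List.pyGetD nums i 0], d',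
           (acc ++ [dcInt (t :: tl)]) ++ [dcInt (tl ++ [PySem.List.pyGetD nums i 0])])
      ∧ ∀ y, d'.getD y 0 = (((tl ++ [PySem.List.pyGetD nums i 0]).count y : Nat) : Int) := by
  set v := PySem.List.pyGetD nums i 0 with hv
  have hdic1 : ∀ y, (d.insert t (d.getD t 0 - 1)).getD y 0 = ((tl.count y : Nat) : Int) := by
    intro y
    rw [PySem.Dict.getD_insert]
    by_cases hy : y = t
    · subst hy; rw [hd y]; simp [List.count_cons_self]
    · rw [if_neg hy, hd y, List.count_cons]; simp [Ne.symm hy]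
  refine ⟨(d.insert t (d.getD t 0 - 1)).insert v
      ((d.insert t (d.getD t 0 - 1)).getD v 0 + 1), ?_, ?_⟩
  · simp only [distinctAStep, List.headD_cons, List.tail_cons, List.getLastD_concat, ← hv,
      hdic1]
    have hcount : ∀ (y : Int), ((tl.count y : Nat) : Int) = 0 ↔ y ∉ tl := by
      intro y; simp [List.count_eq_zero]
    by_cases h1 : v ∈ tl <;> by_cases h2 : t ∈ tl <;>
      simp only [hcount, h1, h2, not_true, not_false_iff, true_and, and_true, and_false,
        false_and, if_true, if_false] <;>
      simp [List.count_eq_zero, h1, h2, List.append_assoc,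
        dcInt_cons, dcInt_append_singleton]
  · intro y
    rw [PySem.Dict.getD_insert]
    by_cases hy : y = v
    · subst hy; rw [if_pos rfl, hdic1 v]; simp [List.count_append]
    · rw [if_neg hy, hdic1 y, List.count_append, List.count_singleton]
      simp [Ne.symm hy]

theorem loopA (nums : List Int) (k : Int) (hk : 1 ≤ k) :
    ∀ (m : Nat) (a : Int) (d : PySem.Dict Int Int) (acc : List Int),
    (∀ y, d.getD y 0 =
        ((((PySem.List.pyRange (a - k) a).map (fun j => PySem.List.pyGetD nums j 0)).count y : Nat) : Int)) →
    ((PySem.List.pyRange a (a + m)).foldl (distinctAStep nums)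
        ((PySem.List.pyRange (a - k) a).map (fun j => PySem.List.pyGetD nums j 0), d,
         acc ++ [dcInt ((PySem.List.pyRange (a - k) a).map (fun j => PySem.List.pyGetD nums j 0))])).2.2
      = acc ++ (PySem.List.pyRange a (a + m + 1)).map
          (fun j => dcInt ((PySem.List.pyRange (j - k) j).map (fun i => PySem.List.pyGetD nums i 0))) := by
  intro m
  induction m with
  | zero =>
    intro a d acc _
    rw [show a + ((0:Nat):Int) + 1 = a + 1 by push_cast; ring, PySem.List.pyRange_one_singleton]
    simp
  | succ m ih =>
    intro a d acc hd
    rw [PySem.List.pyRange_one_cons (show a < a + ((m + 1 : Nat) : Int) by push_cast; omega)]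
    simp only [List.foldl_cons]
    have hwin : PySem.List.pyRange (a - k) a = (a - k) :: PySem.List.pyRange (a - k + 1) a :=
      PySem.List.pyRange_one_cons (by omega)
    rw [hwin]
    simp only [List.map_cons]
    obtain ⟨d', hstep, hd'⟩ := stepA_eq nums (PySem.List.pyGetD nums (a - k) 0)
      ((PySem.List.pyRange (a - k + 1) a).map (fun j => PySem.List.pyGetD nums j 0)) d acc a
      (by intro y; rw [hd y, hwin]; simp)
    rw [hstep]
    have htail : ((PySem.List.pyRange (a - k + 1) a).map (fun j => PySem.List.pyGetD nums j 0))
          ++ [PySem.List.pyGetD nums a 0]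
        = (PySem.List.pyRange (a + 1 - k) (a + 1)).map (fun j => PySem.List.pyGetD nums j 0) := by
      rw [show a + 1 - k = a - k + 1 by ring,
        PySem.List.pyRange_one_succ_right (show a - k + 1 ≤ a by omega)]
      simp
    rw [htail] at hstep hd' ⊢
    have hih := ih (a + 1) d' (acc ++ [dcInt (PySem.List.pyGetD nums (a - k) 0 ::
        (PySem.List.pyRange (a - k + 1) a).map (fun j => PySem.List.pyGetD nums j 0))]) hd'
    have e1 : a + ((m + 1 : Nat) : Int) = a + 1 + (m : Nat) := by push_cast; ring
    rw [e1, hih]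
    rw [PySem.List.pyRange_one_cons (show a < a + 1 + (m : Nat) + 1 by omega)]
    simp [hwin, List.append_assoc]
theorem aFill_split (nums : List Int) (l : List Int) (q : List Int) (d : PySem.Dict Int Int) :
    l.foldl (distinctAFill nums) (q, d)
      = (q ++ l.map (fun i => PySem.List.pyGetD nums i 0),
         l.foldl (fun d i => d.insert (PySem.List.pyGetD nums i 0)
            (d.getD (PySem.List.pyGetD nums i 0) 0 + 1)) d) := by
  induction l generalizing q d with
  | nil => simp
  | cons x xs ih => simp [distinctAFill, ih]

theorem setLen_eq_dcInt (l : List Int) :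
    PySem.Set.len (PySem.Set.ofList l) = dcInt l := by
  have h1 : (PySem.Set.ofList l).toFinset = l.toFinset := by
    ext x; simp [List.mem_toFinset, PySem.Set.mem_ofList]
  have h2 := List.toFinset_card_of_nodup (PySem.Set.nodup_ofList (xs := l))
  simp [PySem.Set.len, dcInt, ← h2, h1]

theorem fillDict_counts (nums : List Int) (k : Int) :
    ∀ y : Int, ((PySem.List.pyRange 0 k).foldl (fun d i =>
        d.insert (PySem.List.pyGetD nums i 0) (d.getD (PySem.List.pyGetD nums i 0) 0 + 1))
        PySem.Dict.empty).getD y 0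
      = ((((PySem.List.pyRange 0 k).map (fun j => PySem.List.pyGetD nums j 0)).count y : Nat) : Int) := by
  intro y
  have hm : ((PySem.List.pyRange 0 k).foldl (fun d i =>
        d.insert (PySem.List.pyGetD nums i 0) (d.getD (PySem.List.pyGetD nums i 0) 0 + 1))
        (PySem.Dict.empty : PySem.Dict Int Int))
      = (((PySem.List.pyRange 0 k).map (fun i => PySem.List.pyGetD nums i 0)).foldl
          (fun d x => d.insert x (d.getD x 0 + 1)) PySem.Dict.empty) := by
    rw [List.foldl_map]
  rw [hm, PySem.Dict.getD_foldl_insert_add_one]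
  simp

theorem loopB (nums : List Int) (k : Int) (hk : 1 ≤ k) :
    ∀ (m : Nat) (a : Int) (acc : List Int),
    ((PySem.List.pyRange a (a + m)).foldl (distinctBStep nums)
        ((PySem.List.pyRange (a - k) a).map (fun j => PySem.List.pyGetD nums j 0),
         acc ++ [dcInt ((PySem.List.pyRange (a - k) a).map (fun j => PySem.List.pyGetD nums j 0))])).2
      = acc ++ (PySem.List.pyRange a (a + m + 1)).map
          (fun j => dcInt ((PySem.List.pyRange (j - k) j).map (fun i => PySem.List.pyGetD nums i 0))) := by
  intro m
  induction m with
  | zero =>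
    intro a acc
    rw [show a + ((0:Nat):Int) + 1 = a + 1 by push_cast; ring, PySem.List.pyRange_one_singleton]
    simp
  | succ m ih =>
    intro a acc
    rw [PySem.List.pyRange_one_cons (show a < a + ((m + 1 : Nat) : Int) by push_cast; omega)]
    simp only [List.foldl_cons]
    have hwin : PySem.List.pyRange (a - k) a = (a - k) :: PySem.List.pyRange (a - k + 1) a :=
      PySem.List.pyRange_one_cons (by omega)
    have htail : ((PySem.List.pyRange (a - k) a).map (fun j => PySem.List.pyGetD nums j 0)).tail
          ++ [PySem.List.pyGetD nums a 0]
        = (PySem.List.pyRange (a + 1 - k) (a + 1)).map (fun j => PySem.List.pyGetD nums j 0) := by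
      rw [hwin, show a + 1 - k = a - k + 1 by ring,
        PySem.List.pyRange_one_succ_right (show a - k + 1 ≤ a by omega)]
      simp
    have hstep : distinctBStep nums
        ((PySem.List.pyRange (a - k) a).map (fun j => PySem.List.pyGetD nums j 0),
         acc ++ [dcInt ((PySem.List.pyRange (a - k) a).map (fun j => PySem.List.pyGetD nums j 0))]) a
      = ((PySem.List.pyRange (a + 1 - k) (a + 1)).map (fun j => PySem.List.pyGetD nums j 0),
         (acc ++ [dcInt ((PySem.List.pyRange (a - k) a).map (fun j => PySem.List.pyGetD nums j 0))])
           ++ [dcInt ((PySem.List.pyRange (a + 1 - k) (a + 1)).map (fun j => PySem.List.pyGetD nums j 0))]) := by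
      simp only [distinctBStep, htail, setLen_eq_dcInt]
    rw [hstep]
    have hih := ih (a + 1)
      (acc ++ [dcInt ((PySem.List.pyRange (a - k) a).map (fun j => PySem.List.pyGetD nums j 0))])
    have e1 : a + ((m + 1 : Nat) : Int) = a + 1 + (m : Nat) := by push_cast; ring
    rw [e1, hih]
    rw [PySem.List.pyRange_one_cons (show a < a + 1 + (m : Nat) + 1 by omega)]
    simp [List.append_assoc]

theorem main_case (nums : List Int) (k : Int) (hk1 : 1 ≤ k) (hk2 : k ≤ (nums.length : Int)) :
    distinctNumbers nums k = distinctNumbers_alt nums k := by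
  simp only [distinctNumbers, distinctNumbers_alt]
  rw [aFill_split]
  simp only [List.nil_append]
  rw [setLen_eq_dcInt]
  have hmainA := loopA nums k hk1 (((nums.length : Int) - k).toNat) k
    ((PySem.List.pyRange 0 k).foldl (fun d i =>
        d.insert (PySem.List.pyGetD nums i 0) (d.getD (PySem.List.pyGetD nums i 0) 0 + 1))
        PySem.Dict.empty) []
    (by
      intro y
      rw [show k - k = (0:Int) from by ring]
      exact fillDict_counts nums k y)
  have hmainB := loopB nums k hk1 (((nums.length : Int) - k).toNat) k []
  rw [show k - k = (0:Int) from by ring] at hmainA hmainB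
  simp only [List.nil_append] at hmainA hmainB
  have hlen : PySem.List.len nums = k + ((((nums.length : Int) - k).toNat : Nat) : Int) := by
    simp only [PySem.List.len]; omega
  rw [hlen, hmainA, hmainB]

-- ===== VERDICT (by name: the statement is the Claim_ definition above) =====
theorem distinctNumbers_spec : Claim_equal_distinctNumbers := by
  intro nums k _ hpre
  unfold Spec_distinctNumbers
  rcases hpre with ⟨hk1, hk2⟩ | ⟨hk0, hnil⟩
  · exact main_case nums k hk1 hk2
  · subst hk0 hnil
    decide
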